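-- pv_equiv track=rewrite | github.com/kordless/gnosis-wraith | ai/tools/url_suggestion.py | categorize_domain
-- ===== SOURCE A (Python) =====
-- def categorize_domain(domain: str) -> str:
--     """Categorize the type of domain."""
--     if any(news in domain for news in ['news', 'times', 'post', 'reuters', 'bloomberg']):
--         return 'news'
--     elif any(social in domain for social in ['twitter', 'facebook', 'instagram', 'linkedin']):
--         return 'social_media'
--     elif any(tech in domain for tech in ['github', 'stackoverflow', 'developer']):
--         return 'technical'
--     elif any(docs in domain for docs in ['docs', 'documentation', 'wiki']):
--         return 'documentation'
--     elif domain.endswith('.edu'):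
--         return 'educational'
--     elif domain.endswith('.gov'):
--         return 'government'
--     else:
--         return 'general'
-- ===== SOURCE B (Python) =====
-- _KEYWORD_RANKS = [
--     ('news', 0, 'news'), ('times', 0, 'news'), ('post', 0, 'news'),
--     ('reuters', 0, 'news'), ('bloomberg', 0, 'news'),
--     ('twitter', 1, 'social_media'), ('facebook', 1, 'social_media'),
--     ('instagram', 1, 'social_media'), ('linkedin', 1, 'social_media'),
--     ('github', 2, 'technical'), ('stackoverflow', 2, 'technical'),
--     ('developer', 2, 'technical'),
--     ('docs', 3, 'documentation'), ('documentation', 3, 'documentation'),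
--     ('wiki', 3, 'documentation'),
-- ]
--
--
-- def categorize_domain(domain: str) -> str:
--     """Categorize the type of domain.
--
--     Single left-to-right scan of the domain: at each position record the
--     best-ranked (lowest-numbered) keyword category that starts there; the
--     suffix rules apply only when no keyword occurred anywhere.
--     """
--     best_rank, best_cat = 6, 'general'
--     for i in range(len(domain)):
--         for kw, rank, cat in _KEYWORD_RANKS:
--             if rank < best_rank and domain.startswith(kw, i):
--                 best_rank, best_cat = rank, cat
--     if best_rank < 6:
--         return best_cat
--     if domain.endswith('.edu'):
--         return 'educational'
--     if domain.endswith('.gov'):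
--         return 'government'
--     return 'general'
-- ===== Notes on version B (the rewrite author's own statement) =====
-- stated objective: alternative
-- what changed: Instead of A's per-keyword substring membership tests arranged in an if/elif chain, B makes a single left-to-right scan over the positions of the domain, maintaining the minimum category rank of any keyword starting at each position, and resolves suffix rules only when the scan found nothing.
import Mathlib
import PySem

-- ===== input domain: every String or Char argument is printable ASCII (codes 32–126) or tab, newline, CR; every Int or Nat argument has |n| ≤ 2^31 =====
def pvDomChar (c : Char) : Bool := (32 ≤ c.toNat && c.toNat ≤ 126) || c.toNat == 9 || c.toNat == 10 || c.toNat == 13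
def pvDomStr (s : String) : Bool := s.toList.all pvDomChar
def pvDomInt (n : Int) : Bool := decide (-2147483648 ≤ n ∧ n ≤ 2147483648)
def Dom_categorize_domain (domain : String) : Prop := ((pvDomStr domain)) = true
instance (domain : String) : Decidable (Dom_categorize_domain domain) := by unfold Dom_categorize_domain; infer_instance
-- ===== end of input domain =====

-- B replaces A's if/elif chain of per-keyword membership tests by a single position scan of the domain that tracks the minimum-ranked keyword match (alternative algorithm, same cost).


-- ===== PORT A =====
def categorize_domain (domain : String) : String :=
  if ["news", "times", "post", "reuters", "bloomberg"].any (fun news => PySem.Str.isIn news domain) then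
    "news"
  else if ["twitter", "facebook", "instagram", "linkedin"].any (fun social => PySem.Str.isIn social domain) then
    "social_media"
  else if ["github", "stackoverflow", "developer"].any (fun tech => PySem.Str.isIn tech domain) then
    "technical"
  else if ["docs", "documentation", "wiki"].any (fun docs => PySem.Str.isIn docs domain) then
    "documentation"
  else if PySem.Str.endswith domain ".edu" then
    "educational"
  else if PySem.Str.endswith domain ".gov" then
    "government"
  else
    "general"

-- ===== PORT B =====
def pvKws : List (String × Nat × String) :=
  [ ("news", 0, "news"), ("times", 0, "news"), ("post", 0, "news"),
    ("reuters", 0, "news"), ("bloomberg", 0, "news"),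
    ("twitter", 1, "social_media"), ("facebook", 1, "social_media"),
    ("instagram", 1, "social_media"), ("linkedin", 1, "social_media"),
    ("github", 2, "technical"), ("stackoverflow", 2, "technical"),
    ("developer", 2, "technical"),
    ("docs", 3, "documentation"), ("documentation", 3, "documentation"),
    ("wiki", 3, "documentation") ]

-- Python's domain.startswith(kw, i) for 0 ≤ i ≤ len(domain): exact via drop + startswith.
def pvSw (cs : List Char) (kw : String) (i : Nat) : Bool :=
  PySem.Chars.startswith (cs.drop i) kw.toList

-- the inner 'for kw, rank, cat in _KEYWORD_RANKS' loop body
def pvInner (cs : List Char) (i : Nat) (ks : List (String × Nat × String))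
    (b : Nat × String) : Nat × String :=
  ks.foldl (fun b p => if p.2.1 < b.1 && pvSw cs p.1 i then (p.2.1, p.2.2) else b) b

-- the outer 'for i in range(len(domain))' loop
def pvScan (cs : List Char) (is_ : List Nat) (b : Nat × String) : Nat × String :=
  is_.foldl (fun b i => pvInner cs i pvKws b) b

def categorize_domain_alt (domain : String) : String :=
  let cs := domain.toList
  let best := pvScan cs (List.range cs.length) (6, "general")
  if best.1 < 6 then best.2
  else if PySem.Str.endswith domain ".edu" then "educational"
  else if PySem.Str.endswith domain ".gov" then "government"
  else "general"

-- ===== PRECONDITION & SPEC =====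
def Spec_categorize_domain (domain : String) (out : String) : Prop := out = categorize_domain_alt domain
instance (domain : String) (out : String) : Decidable (Spec_categorize_domain domain out) := by unfold Spec_categorize_domain; infer_instance

-- ===== CLAIM (what is proved, stated in full; the proofs are below) =====
def Claim_equal_categorize_domain : Prop := ∀ (domain : String), Dom_categorize_domain domain → Spec_categorize_domain domain (categorize_domain domain)

-- ===== LEMMAS AND PROOFS =====

-- the scan's first component behaves as a running minimum of matched ranks
theorem pvInner_fst_le (cs : List Char) (i : Nat) (ks : List (String × Nat × String))
    (b : Nat × String) (r : Nat) :
    ((pvInner cs i ks b).1 ≤ r ↔ b.1 ≤ r ∨ ∃ p ∈ ks, pvSw cs p.1 i = true ∧ p.2.1 ≤ r) := by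
  induction ks generalizing b with
  | nil => simp [pvInner]
  | cons p ks ih =>
    have hstep : pvInner cs i (p :: ks) b
        = pvInner cs i ks (if p.2.1 < b.1 && pvSw cs p.1 i then (p.2.1, p.2.2) else b) := rfl
    rw [hstep, ih]
    by_cases hs : pvSw cs p.1 i = true
    · by_cases hlt : p.2.1 < b.1
      · simp only [hs, hlt, decide_true, Bool.and_self, if_pos, List.mem_cons]
        constructor
        · rintro (h1 | ⟨q, hq, hsq, hr⟩)
          · exact Or.inr ⟨p, Or.inl rfl, hs, h1⟩
          · exact Or.inr ⟨q, Or.inr hq, hsq, hr⟩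
        · rintro (h1 | ⟨q, (rfl | hq), hsq, hr⟩)
          · exact Or.inl (by omega)
          · exact Or.inl hr
          · exact Or.inr ⟨q, hq, hsq, hr⟩
      · simp only [hlt, decide_false, Bool.false_and, Bool.false_eq_true, if_false, List.mem_cons]
        constructor
        · rintro (h1 | ⟨q, hq, hsq, hr⟩)
          · exact Or.inl h1
          · exact Or.inr ⟨q, Or.inr hq, hsq, hr⟩
        · rintro (h1 | ⟨q, (rfl | hq), hsq, hr⟩)
          · exact Or.inl h1
          · exact Or.inl (by omega)
          · exact Or.inr ⟨q, hq, hsq, hr⟩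
    · rw [Bool.not_eq_true] at hs
      simp only [hs, Bool.and_false, Bool.false_eq_true, if_false, List.mem_cons]
      constructor
      · rintro (h1 | ⟨q, hq, hsq, hr⟩)
        · exact Or.inl h1
        · exact Or.inr ⟨q, Or.inr hq, hsq, hr⟩
      · rintro (h1 | ⟨q, (rfl | hq), hsq, hr⟩)
        · exact Or.inl h1
        · exact absurd hsq (by simp [hs])
        · exact Or.inr ⟨q, hq, hsq, hr⟩

theorem pvScan_fst_le (cs : List Char) (is_ : List Nat) (b : Nat × String) (r : Nat) :
    ((pvScan cs is_ b).1 ≤ r ↔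
      b.1 ≤ r ∨ ∃ i ∈ is_, ∃ p ∈ pvKws, pvSw cs p.1 i = true ∧ p.2.1 ≤ r) := by
  induction is_ generalizing b with
  | nil => simp [pvScan]
  | cons i is_ ih =>
    have hstep : pvScan cs (i :: is_) b = pvScan cs is_ (pvInner cs i pvKws b) := by
      simp only [pvScan, List.foldl_cons]
    rw [hstep, ih, pvInner_fst_le]
    simp only [List.mem_cons]
    constructor
    · rintro ((h1 | ⟨p, hp, hsq, hr⟩) | ⟨j, hj, p, hp, hsq, hr⟩)
      · exact Or.inl h1
      · exact Or.inr ⟨i, Or.inl rfl, p, hp, hsq, hr⟩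
      · exact Or.inr ⟨j, Or.inr hj, p, hp, hsq, hr⟩
    · rintro (h1 | ⟨j, (rfl | hj), p, hp, hsq, hr⟩)
      · exact Or.inl (Or.inl h1)
      · exact Or.inl (Or.inr ⟨p, hp, hsq, hr⟩)
      · exact Or.inr ⟨j, hj, p, hp, hsq, hr⟩

def pvCatOf : Nat → String
  | 0 => "news" | 1 => "social_media" | 2 => "technical" | 3 => "documentation"
  | _ => "general"

theorem pvInner_snd (cs : List Char) (i : Nat) (ks : List (String × Nat × String))
    (b : Nat × String) (hb : b.2 = pvCatOf b.1) (hks : ∀ p ∈ ks, p.2.2 = pvCatOf p.2.1) :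
    (pvInner cs i ks b).2 = pvCatOf (pvInner cs i ks b).1 := by
  induction ks generalizing b with
  | nil => simpa [pvInner]
  | cons p ks ih =>
    have hstep : pvInner cs i (p :: ks) b
        = pvInner cs i ks (if p.2.1 < b.1 && pvSw cs p.1 i then (p.2.1, p.2.2) else b) := rfl
    rw [hstep]
    refine ih _ ?_ (fun q hq => hks q (List.mem_cons_of_mem _ hq))
    by_cases hC : (p.2.1 < b.1 && pvSw cs p.1 i) = true
    · simpa [hC] using hks p (List.mem_cons_self ..)
    · rw [Bool.not_eq_true] at hC
      simpa [hC] using hb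

theorem pvScan_snd (cs : List Char) (is_ : List Nat) (b : Nat × String)
    (hb : b.2 = pvCatOf b.1) :
    (pvScan cs is_ b).2 = pvCatOf (pvScan cs is_ b).1 := by
  induction is_ generalizing b with
  | nil => simpa [pvScan]
  | cons i is_ ih =>
    have hstep : pvScan cs (i :: is_) b = pvScan cs is_ (pvInner cs i pvKws b) := by
      simp only [pvScan, List.foldl_cons]
    rw [hstep]
    exact ih _ (pvInner_snd cs i pvKws b hb (by decide))

-- a nonempty keyword starts at some scanned position iff it is a substring
theorem pvSw_exists_iff (cs : List Char) (kw : String) (hk : kw.toList ≠ []) :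
    ((∃ i ∈ List.range cs.length, pvSw cs kw i = true) ↔ PySem.Chars.isIn kw.toList cs = true) := by
  rw [← PySem.Chars.exists_prefix_drop_iff_isIn]
  constructor
  · rintro ⟨i, _, hs⟩
    exact ⟨i, (PySem.Chars.startswith_iff _ _).1 hs⟩
  · rintro ⟨j, hj⟩
    refine ⟨j, List.mem_range.2 ?_, (PySem.Chars.startswith_iff _ _).2 hj⟩
    by_contra hge
    have : cs.drop j = [] := List.drop_eq_nil_of_le (by omega)
    rw [this, List.prefix_nil] at hj
    exact hk hj

-- ===== VERDICT (by name: the statement is the Claim_ definition above) =====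
theorem categorize_domain_spec : Claim_equal_categorize_domain := by
  intro domain _
  unfold Spec_categorize_domain categorize_domain categorize_domain_alt
  simp only [PySem.Str.isIn_eq, List.any_cons, List.any_nil, Bool.or_false, Bool.or_eq_true]
  set cs := domain.toList with hcs
  set best := pvScan cs (List.range cs.length) (6, "general") with hbest
  have hsnd : best.2 = pvCatOf best.1 := pvScan_snd cs _ _ (by decide)
  have key : ∀ r : Nat, (best.1 ≤ r ↔ 6 ≤ r ∨
      ∃ p ∈ pvKws, p.2.1 ≤ r ∧ PySem.Chars.isIn p.1.toList cs = true) := by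
    intro r
    rw [hbest, pvScan_fst_le]
    constructor
    · rintro (h6 | ⟨i, hi, p, hp, hs, hr⟩)
      · exact Or.inl h6
      · exact Or.inr ⟨p, hp, hr, (pvSw_exists_iff cs p.1 (by fin_cases hp <;> decide)).1 ⟨i, hi, hs⟩⟩
    · rintro (h6 | ⟨p, hp, hr, hin⟩)
      · exact Or.inl h6
      · obtain ⟨i, hi, hs⟩ := (pvSw_exists_iff cs p.1 (by fin_cases hp <;> decide)).2 hin
        exact Or.inr ⟨i, hi, p, hp, hs, hr⟩
  have h6 : best.1 ≤ 6 := (key 6).2 (Or.inl le_rfl)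
  clear_value best
  have c0 := key 0; have c1 := key 1; have c2 := key 2; have c3 := key 3; have c5 := key 5
  simp only [pvKws, List.exists_mem_cons_iff, List.not_mem_nil, false_and, exists_false,
    or_false, Nat.reduceLeDiff, true_and, false_or, false_and, le_refl,
    Nat.le_zero, OfNat.ofNat_ne_zero, one_ne_zero, zero_le] at c0 c1 c2 c3 c5
  by_cases g0 : PySem.Chars.isIn "news".toList cs = true ∨
      PySem.Chars.isIn "times".toList cs = true ∨
      PySem.Chars.isIn "post".toList cs = true ∨
      PySem.Chars.isIn "reuters".toList cs = true ∨
      PySem.Chars.isIn "bloomberg".toList cs = true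
  · have hb : best.1 = 0 := c0.2 g0
    rw [if_pos g0, if_pos (show best.1 < 6 by omega), hsnd, hb]; rfl
  · by_cases g1 : PySem.Chars.isIn "twitter".toList cs = true ∨
        PySem.Chars.isIn "facebook".toList cs = true ∨
        PySem.Chars.isIn "instagram".toList cs = true ∨
        PySem.Chars.isIn "linkedin".toList cs = true
    · have hb : best.1 = 1 := by
        have h0 : ¬ best.1 = 0 := fun h => g0 (c0.1 h)
        have hle := c1.2 (Or.inr (Or.inr (Or.inr (Or.inr (Or.inr (g1))))))
        omega
      rw [if_neg g0, if_pos g1, if_pos (show best.1 < 6 by omega), hsnd, hb]; rfl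
    · by_cases g2 : PySem.Chars.isIn "github".toList cs = true ∨
          PySem.Chars.isIn "stackoverflow".toList cs = true ∨
          PySem.Chars.isIn "developer".toList cs = true
      · have hb : best.1 = 2 := by
          have h1 : ¬ best.1 ≤ 1 := fun h => by
            rcases c1.1 h with h'|h'|h'|h'|h'|h'
            · exact g0 (Or.inl h')
            · exact g0 (Or.inr (Or.inl h'))
            · exact g0 (Or.inr (Or.inr (Or.inl h')))
            · exact g0 (Or.inr (Or.inr (Or.inr (Or.inl h'))))
            · exact g0 (Or.inr (Or.inr (Or.inr (Or.inr h'))))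
            · exact g1 h'
          have hle := c2.2 (Or.inr (Or.inr (Or.inr (Or.inr (Or.inr (Or.inr (Or.inr (Or.inr (Or.inr (g2))))))))))
          omega
        rw [if_neg g0, if_neg g1, if_pos g2, if_pos (show best.1 < 6 by omega), hsnd, hb]; rfl
      · by_cases g3 : PySem.Chars.isIn "docs".toList cs = true ∨
            PySem.Chars.isIn "documentation".toList cs = true ∨
            PySem.Chars.isIn "wiki".toList cs = true
        · have hb : best.1 = 3 := by
            have h2 : ¬ best.1 ≤ 2 := fun h => by
              rcases c2.1 h with h'|h'|h'|h'|h'|h'|h'|h'|h'|h'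
              · exact g0 (Or.inl h')
              · exact g0 (Or.inr (Or.inl h'))
              · exact g0 (Or.inr (Or.inr (Or.inl h')))
              · exact g0 (Or.inr (Or.inr (Or.inr (Or.inl h'))))
              · exact g0 (Or.inr (Or.inr (Or.inr (Or.inr h'))))
              · exact g1 (Or.inl h')
              · exact g1 (Or.inr (Or.inl h'))
              · exact g1 (Or.inr (Or.inr (Or.inl h')))
              · exact g1 (Or.inr (Or.inr (Or.inr h')))
              · exact g2 h'
            have hle := c3.2 (Or.inr (Or.inr (Or.inr (Or.inr (Or.inr (Or.inr (Or.inr (Or.inr (Or.inr (Or.inr (Or.inr (Or.inr (g3)))))))))))))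
            omega
          rw [if_neg g0, if_neg g1, if_neg g2, if_pos g3, if_pos (show best.1 < 6 by omega), hsnd, hb]; rfl
        · have h5 : ¬ best.1 ≤ 5 := fun h => by
            rcases c5.1 h with h'|h'|h'|h'|h'|h'|h'|h'|h'|h'|h'|h'|h'
            · exact g0 (Or.inl h')
            · exact g0 (Or.inr (Or.inl h'))
            · exact g0 (Or.inr (Or.inr (Or.inl h')))
            · exact g0 (Or.inr (Or.inr (Or.inr (Or.inl h'))))
            · exact g0 (Or.inr (Or.inr (Or.inr (Or.inr h'))))
            · exact g1 (Or.inl h')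
            · exact g1 (Or.inr (Or.inl h'))
            · exact g1 (Or.inr (Or.inr (Or.inl h')))
            · exact g1 (Or.inr (Or.inr (Or.inr h')))
            · exact g2 (Or.inl h')
            · exact g2 (Or.inr (Or.inl h'))
            · exact g2 (Or.inr (Or.inr h'))
            · exact g3 h'
          rw [if_neg g0, if_neg g1, if_neg g2, if_neg g3, if_neg (show ¬ best.1 < 6 by omega)]
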